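-- pv_equiv track=rewrite | github.com/enriquedlh97/algoDS | algosds/problems/categories/strings/generate_document.py | generate_document_single_counts
-- ===== SOURCE A (Python) =====
-- def generate_document_single_counts(characters, document) -> bool:
--     """ Checks if enough characters are available by only counting the occurrence of each unique character once
--
--     This solution is almost the same as the previous one. The only difference is that the count for each unique
--     character is only done once, and the result is saved in a set.
--
--     The conditions used are the same.
--
--     :param characters: string containing the available characters
--     :param document: string containing the target that is to be checked if it can be generated
--     :return: Returns True if the document string can be generated from the characters string; return False otherwise
--     """
--     already_counted = set()
--
--     for character in document:
--         if character in already_counted: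
--             continue
--
--         document_frequency = count_character_frequency(character, document)
--         characters_frequency = count_character_frequency(character, characters)
--
--         if document_frequency > characters_frequency:
--             return False
--
--         already_counted.add(character)
--
--     return True
--
-- def count_character_frequency(character, target) -> int:
--     """ Helper function for multiple counts and single counts solutions
--
--     This function is used by the two previous solutions (multiple counts and single counts) to get the frequency of a
--     given character in the target string.
--
--     :param character: string containing the character for which its frequency is to be determined.
--     :param target: string to be checked for the frequency of the character.
--     :return: int representing the frequency that the character appears in the target string.
--     """
--     frequency = 0
--     for char in target:
--         if char == character:
--             frequency += 1
--
--     return frequency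
-- ===== SOURCE B (Python) =====
-- def generate_document_single_counts(characters, document) -> bool:
--     """Build a frequency budget of the available characters once, then consume
--     it in a single early-exit pass over the document."""
--     budget = {}
--     for ch in characters:
--         budget[ch] = budget.get(ch, 0) + 1
--     for ch in document:
--         remaining = budget.get(ch, 0)
--         if remaining == 0:
--             return False
--         budget[ch] = remaining - 1
--     return True
-- ===== Notes on version B (the rewrite author's own statement) =====
-- stated objective: simpler
-- what changed: Replaces A's loop over document characters with two full counting scans per unique character (plus a seen-set) by building a character-frequency budget once and consuming it in a single early-exit pass over the document.
import Mathlib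
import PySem

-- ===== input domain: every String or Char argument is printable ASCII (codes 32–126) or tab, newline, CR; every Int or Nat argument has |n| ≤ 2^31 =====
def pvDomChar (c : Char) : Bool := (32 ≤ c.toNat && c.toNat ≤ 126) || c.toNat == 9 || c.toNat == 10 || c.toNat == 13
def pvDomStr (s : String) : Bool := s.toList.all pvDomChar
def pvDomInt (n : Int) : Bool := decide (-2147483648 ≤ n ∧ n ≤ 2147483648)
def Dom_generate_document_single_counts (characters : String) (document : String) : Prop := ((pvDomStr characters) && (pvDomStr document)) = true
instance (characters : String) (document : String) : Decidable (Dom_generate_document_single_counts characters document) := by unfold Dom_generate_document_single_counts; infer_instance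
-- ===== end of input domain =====

-- B replaces A's per-unique-character double counting scans by a frequency budget built
-- once and consumed in a single early-exit pass over the document (objective: simpler).

-- ===== PORT A =====
-- helper count_character_frequency: manual counting loop over target
def count_character_frequency (character : Char) (target : String) : Int :=
  target.toList.foldl (fun frequency char => if char == character then frequency + 1 else frequency) 0

-- the 'for character in document' loop of A, carrying the already_counted set
def genAGo (characters document : String) : List Char → PySem.Set Char → Bool
  | [], _ => true
  | character :: rest, already_counted =>
    if PySem.Set.contains already_counted character then
      genAGo characters document rest already_counted
    else if count_character_frequency character document > count_character_frequency character characters then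
      false
    else
      genAGo characters document rest (PySem.Set.add already_counted character)

def generate_document_single_counts (characters : String) (document : String) : Bool :=
  genAGo characters document document.toList PySem.Set.empty

-- ===== PORT B =====
-- the consuming pass of Source B: decrement the budget, early-exit on an exhausted entry
def bConsume : List Char → PySem.Dict Char Int → Bool
  | [], _ => true
  | ch :: rest, budget =>
    let remaining := budget.getD ch 0
    if remaining == 0 then false
    else bConsume rest (budget.insert ch (remaining - 1))

def generate_document_single_counts_alt (characters : String) (document : String) : Bool :=
  -- budget build loop: budget[ch] = budget.get(ch, 0) + 1
  let budget := characters.toList.foldl (fun d ch => d.modify ch 0 (· + 1)) PySem.Dict.empty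
  bConsume document.toList budget

-- ===== PRECONDITION & SPEC =====
def Spec_generate_document_single_counts (characters : String) (document : String) (out : Bool) : Prop := out = generate_document_single_counts_alt characters document
instance (characters : String) (document : String) (out : Bool) : Decidable (Spec_generate_document_single_counts characters document out) := by unfold Spec_generate_document_single_counts; infer_instance

-- ===== CLAIM (what is proved, stated in full; the proofs are below) =====
def Claim_equal_generate_document_single_counts : Prop := ∀ (characters : String) (document : String), Dom_generate_document_single_counts characters document → Spec_generate_document_single_counts characters document (generate_document_single_counts characters document)

-- ===== LEMMAS AND PROOFS =====

theorem freq_foldl (c : Char) (l : List Char) (acc : Int) :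
    l.foldl (fun frequency char => if char == c then frequency + 1 else frequency) acc
      = acc + l.count c := by
  induction l generalizing acc with
  | nil => simp
  | cons a l ih =>
    simp only [List.foldl_cons, List.count_cons, ih]
    by_cases h : a = c
    · simp [h]; ring
    · simp [h]

theorem count_freq_eq (c : Char) (t : String) :
    count_character_frequency c t = (t.toList.count c : Int) := by
  unfold count_character_frequency
  rw [freq_foldl]
  simp

-- A's loop returns true iff every remaining document character fits, given that
-- all characters in the seen-set already fit.
theorem genAGo_eq (chs doc : String) (l : List Char) (seen : PySem.Set Char)
    (hseen : ∀ c ∈ seen, doc.toList.count c ≤ chs.toList.count c) :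
    genAGo chs doc l seen
      = decide (∀ c ∈ l, doc.toList.count c ≤ chs.toList.count c) := by
  induction l generalizing seen with
  | nil => simp [genAGo]
  | cons c rest ih =>
    simp only [genAGo]
    by_cases hc : PySem.Set.contains seen c = true
    · have hcm : c ∈ seen := (PySem.Set.contains_iff seen c).mp hc
      rw [if_pos hc, ih seen hseen]
      simp [hseen c hcm]
    · rw [if_neg hc]
      by_cases hbad : count_character_frequency c doc > count_character_frequency c chs
      · rw [if_pos hbad]
        rw [count_freq_eq, count_freq_eq] at hbad
        have : ¬ (doc.toList.count c ≤ chs.toList.count c) := by exact_mod_cast not_le.mpr hbad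
        simp [this]
      · rw [if_neg hbad]
        rw [count_freq_eq, count_freq_eq] at hbad
        have hok : doc.toList.count c ≤ chs.toList.count c := by exact_mod_cast not_lt.mp hbad
        have hseen' : ∀ x ∈ PySem.Set.add seen c, doc.toList.count x ≤ chs.toList.count x := by
          intro x hx
          rcases (PySem.Set.mem_add seen c x).mp hx with h | h
          · exact hseen x h
          · subst h; exact hok
        rw [ih _ hseen']
        simp [hok]

-- B's consuming pass returns true iff each character's multiplicity in the remaining
-- document fits in the (nonnegative) budget.
theorem bConsume_eq (l : List Char) (d : PySem.Dict Char Int)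
    (hnn : ∀ c, 0 ≤ d.getD c 0) :
    bConsume l d = decide (∀ c ∈ l, (l.count c : Int) ≤ d.getD c 0) := by
  induction l generalizing d with
  | nil => simp [bConsume]
  | cons c rest ih =>
    simp only [bConsume]
    by_cases h0 : d.getD c 0 = 0
    · rw [if_pos (by simpa using h0)]
      have : ¬ ((((c :: rest).count c : Int)) ≤ d.getD c 0) := by
        rw [h0]
        have : 0 < (c :: rest).count c := by simp
        push_cast
        omega
      symm
      simp only [decide_eq_false_iff_not]
      intro hall
      exact this (hall c (by simp))
    · rw [if_neg (by simpa using h0)]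
      have hpos : 0 < d.getD c 0 := lt_of_le_of_ne (hnn c) (Ne.symm h0)
      have hnn' : ∀ x, 0 ≤ (d.insert c (d.getD c 0 - 1)).getD x 0 := by
        intro x
        rw [PySem.Dict.getD_insert]
        split_ifs with hx
        · omega
        · exact hnn x
      rw [ih _ hnn']
      rw [decide_eq_decide]
      constructor
      · intro hall x hx
        rcases List.mem_cons.mp hx with hxc | hxr
        · subst hxc
          by_cases hm : x ∈ rest
          · have := hall x hm
            rw [PySem.Dict.getD_insert, if_pos rfl] at this
            simp only [List.count_cons, BEq.rfl, if_true]
            push_cast at this ⊢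
            omega
          · have : rest.count x = 0 := List.count_eq_zero_of_not_mem hm
            simp only [List.count_cons, BEq.rfl, if_true, this]
            omega
        · have := hall x hxr
          rw [PySem.Dict.getD_insert] at this
          by_cases hxc : x = c
          · subst hxc
            rw [if_pos rfl] at this
            simp only [List.count_cons, BEq.rfl, if_true]
            push_cast at this ⊢
            omega
          · rw [if_neg hxc] at this
            simpa [List.count_cons, Ne.symm hxc] using this
      · intro hall x hx
        rw [PySem.Dict.getD_insert]
        split_ifs with hxc
        · subst hxc
          have := hall x (by simp)
          simp only [List.count_cons, BEq.rfl, if_true] at this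
          push_cast at this ⊢
          omega
        · have := hall x (List.mem_cons_of_mem _ hx)
          simpa [List.count_cons, Ne.symm hxc] using this

-- ===== VERDICT (by name: the statement is the Claim_ definition above) =====
theorem generate_document_single_counts_spec : Claim_equal_generate_document_single_counts := by
  intro characters document _
  unfold Spec_generate_document_single_counts
  unfold generate_document_single_counts generate_document_single_counts_alt
  have hbudget : characters.toList.foldl (fun d ch => d.modify ch 0 (· + 1)) PySem.Dict.empty
      = PySem.Dict.counter characters.toList := by
    rw [PySem.Dict.counter_eq_foldl]
  rw [hbudget]
  have hnn : ∀ c, 0 ≤ (PySem.Dict.counter characters.toList).getD c 0 := by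
    intro c
    rw [PySem.Dict.getD_counter]
    positivity
  rw [bConsume_eq _ _ hnn,
      genAGo_eq characters document document.toList PySem.Set.empty (by intro c hc; simp at hc)]
  rw [decide_eq_decide]
  constructor
  · intro h c hc
    rw [PySem.Dict.getD_counter]
    exact_mod_cast h c hc
  · intro h c hc
    have := h c hc
    rw [PySem.Dict.getD_counter] at this
    exact_mod_cast this
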